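-- pv_equiv track=rewrite | github.com/salmedina/InMind_Email | Server/extractor.py | findFromEnd
-- ===== SOURCE A (Python) =====
-- def findFromEnd(line,text,lineno):
-- 	i = lineno + 1
-- 	sent_index = 0
-- 	to_index = 0
-- 	while i < len(text):
-- 		if "Subject:" in text[i]:
-- 			return i
-- 		if "Re:" in text[i]:
-- 			return i
-- 		if "Date:" in text[i]:
-- 			return i
-- 		if (sent_index == 0) and ("Sent:" in text[i]):
-- 			sent_index = i
-- 		if (to_index ==0 ) and ("To:" in text[i]):
-- 			to_index = i
-- 		i += 1
-- 	if (sent_index !=0) and (to_index != 0):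
-- 		return max(sent_index,to_index)
-- 	else:
-- 		return -1
-- ===== SOURCE B (Python) =====
-- def findFromEnd(line, text, lineno):
--     rng = range(lineno + 1, len(text))
--     hard = next((i for i in rng
--                  if "Subject:" in text[i] or "Re:" in text[i] or "Date:" in text[i]), None)
--     if hard is not None:
--         return hard
--     sent = next((i for i in rng if "Sent:" in text[i]), None)
--     to = next((i for i in rng if "To:" in text[i]), None)
--     return max(sent, to) if sent is not None and to is not None else -1
-- ===== Notes on version B (the rewrite author's own statement) =====
-- stated objective: idiomatic
-- what changed: Replaces A's single interleaved while-loop with mutable 0-sentinel accumulators by phased first-match scans (next over a range): one scan for the hard markers Subject:/Re:/Date:, then independent first-match scans for Sent: and To: with None for 'not found'; Pre_ restricts to the natural domain of nonnegative lineno (a line index scanned forward) — for negative lineno the scan starts at or before index 0 with Python negative indexing and behaviour there is not claimed.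
-- outside the precondition, e.g. on findFromEnd('', ['Sent: a', 'To: b'], -1): A returns -1, B returns 1; on findFromEnd('', ['Sent: a', 'To: b'], -3): A returns -1, B returns -1
import Mathlib
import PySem

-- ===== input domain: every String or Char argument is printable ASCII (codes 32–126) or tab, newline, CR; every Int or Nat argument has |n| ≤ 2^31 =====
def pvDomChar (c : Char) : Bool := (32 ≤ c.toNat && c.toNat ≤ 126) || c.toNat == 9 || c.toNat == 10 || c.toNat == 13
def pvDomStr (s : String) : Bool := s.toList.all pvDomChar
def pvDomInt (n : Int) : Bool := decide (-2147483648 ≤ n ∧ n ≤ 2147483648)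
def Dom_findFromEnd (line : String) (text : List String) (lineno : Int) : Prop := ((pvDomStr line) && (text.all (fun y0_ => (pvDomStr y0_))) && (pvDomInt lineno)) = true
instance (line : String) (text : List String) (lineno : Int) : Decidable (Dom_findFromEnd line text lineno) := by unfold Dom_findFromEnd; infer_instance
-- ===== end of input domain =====

-- B replaces A's interleaved while-loop (0-sentinel accumulators) with phased
-- first-match scans: first hard marker (Subject:/Re:/Date:), then the first
-- "Sent:" and first "To:" lines; objective: idiomatic (no speed claim).


-- ===== PORT A =====
-- the while-loop of A; fuel = number of remaining iterations (len(text) - i)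
def findFromEndLoopA (text : List String) (fuel : Nat) (i sent_index to_index : Int) : Int :=
  match fuel with
  | 0 =>
    if sent_index ≠ 0 ∧ to_index ≠ 0 then max sent_index to_index else -1
  | fuel + 1 =>
    match PySem.List.pyGet? text i with
    | none => 0  -- Python IndexError here; unreachable inside Pre_findFromEnd
    | some s =>
      if PySem.Str.isIn "Subject:" s then i
      else if PySem.Str.isIn "Re:" s then i
      else if PySem.Str.isIn "Date:" s then i
      else
        findFromEndLoopA text fuel (i + 1)
          (if sent_index = 0 ∧ PySem.Str.isIn "Sent:" s then i else sent_index)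
          (if to_index = 0 ∧ PySem.Str.isIn "To:" s then i else to_index)

def findFromEnd (line : String) (text : List String) (lineno : Int) : Int :=
  findFromEndLoopA text ((text.length - (lineno + 1)).toNat) (lineno + 1) 0 0

-- ===== PORT B =====
def findFromEnd_alt (line : String) (text : List String) (lineno : Int) : Int :=
  let rng := PySem.List.pyRange (lineno + 1) text.length 1
  -- text[i]; the none (IndexError) case is unreachable inside Pre_findFromEnd
  let lineAt := fun (i : Int) => (PySem.List.pyGet? text i).getD ""
  match rng.find? (fun i =>
      PySem.Str.isIn "Subject:" (lineAt i) || PySem.Str.isIn "Re:" (lineAt i)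
        || PySem.Str.isIn "Date:" (lineAt i)) with
  | some hard => hard
  | none =>
    match rng.find? (fun i => PySem.Str.isIn "Sent:" (lineAt i)),
          rng.find? (fun i => PySem.Str.isIn "To:" (lineAt i)) with
    | some sent, some tdx => max sent tdx
    | _, _ => -1

-- ===== PRECONDITION & SPEC =====
-- Pre_ restricts to the natural domain: lineno is a line index scanned forward,
-- so it is nonnegative; negative lineno (scan starting at or before index 0,
-- with Python negative indexing) is outside the function's purpose and its
-- behaviour there is not claimed.
def Pre_findFromEnd (line : String) (text : List String) (lineno : Int) : Prop :=
  0 ≤ lineno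
instance (line : String) (text : List String) (lineno : Int) : Decidable (Pre_findFromEnd line text lineno) := by unfold Pre_findFromEnd; infer_instance

def pvWitness_findFromEnd : String × List String × Int := ("", ["hello", "Sent: x", "To: y"], 0)

def Spec_findFromEnd (line : String) (text : List String) (lineno : Int) (out : Int) : Prop := out = findFromEnd_alt line text lineno
instance (line : String) (text : List String) (lineno : Int) (out : Int) : Decidable (Spec_findFromEnd line text lineno out) := by unfold Spec_findFromEnd; infer_instance

-- ===== CLAIM (what is proved, stated in full; the proofs are below) =====
def Claim_equal_findFromEnd : Prop := ∀ (line : String) (text : List String) (lineno : Int), Dom_findFromEnd line text lineno → Pre_findFromEnd line text lineno → Spec_findFromEnd line text lineno (findFromEnd line text lineno)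

-- ===== LEMMAS AND PROOFS =====

-- B's phased computation with generalized accumulators (proof helper);
-- sent/tdx are A's Int accumulators, 0 meaning 'unset' (indices scanned are ≥ 1).
def findFromEndPhase (text : List String) (i sent tdx : Int) : Int :=
  let rng := PySem.List.pyRange i text.length 1
  let lineAt := fun (j : Int) => (PySem.List.pyGet? text j).getD ""
  match rng.find? (fun j =>
      PySem.Str.isIn "Subject:" (lineAt j) || PySem.Str.isIn "Re:" (lineAt j)
        || PySem.Str.isIn "Date:" (lineAt j)) with
  | some hard => hard
  | none =>
    match (if sent ≠ 0 then some sent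
            else rng.find? (fun j => PySem.Str.isIn "Sent:" (lineAt j))),
          (if tdx ≠ 0 then some tdx
            else rng.find? (fun j => PySem.Str.isIn "To:" (lineAt j))) with
    | some s, some t => max s t
    | _, _ => -1

lemma pyGet?_isSome_of_range {α : Type} (xs : List α) (i : Int)
    (h1 : -(xs.length : Int) ≤ i) (h2 : i < (xs.length : Int)) :
    ∃ s, PySem.List.pyGet? xs i = some s := by
  simp only [PySem.List.pyGet?, PySem.List.pyIdx?]
  by_cases h : 0 ≤ i
  · simp only [h, if_pos, if_pos h2, Option.bind_some]
    exact ⟨xs[i.toNat]'(by omega), by rw [List.getElem?_eq_getElem (by omega)]⟩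
  · simp only [h, if_pos h1, Option.bind_some, if_false]
    exact ⟨xs[xs.length - (-i).toNat]'(by omega), by
      rw [List.getElem?_eq_getElem (by omega)]⟩

lemma loopA_eq_phase (text : List String) :
    ∀ (fuel : Nat) (i sent tdx : Int),
      fuel = ((text.length : Int) - i).toNat →
      1 ≤ i →
      findFromEndLoopA text fuel i sent tdx
        = findFromEndPhase text i sent tdx := by
  intro fuel
  induction fuel with
  | zero =>
    intro i sent tdx hfuel hlo
    have hnil : PySem.List.pyRange i text.length 1 = [] := by
      rw [PySem.List.pyRange_one]
      have : ((text.length : Int) - i).toNat = 0 := by omega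
      simp [this]
    simp only [findFromEndLoopA, findFromEndPhase, hnil, List.find?_nil]
    by_cases hs : sent = 0 <;> by_cases ht : tdx = 0 <;> simp [hs, ht]
  | succ n ih =>
    intro i sent tdx hfuel hlo
    have hlt : i < (text.length : Int) := by omega
    obtain ⟨s, hs⟩ := pyGet?_isSome_of_range text i (by omega) hlt
    have hcons : PySem.List.pyRange i text.length 1
        = i :: PySem.List.pyRange (i + 1) text.length 1 :=
      PySem.List.pyRange_one_cons hlt
    by_cases hSub : PySem.Chars.isIn ['S','u','b','j','e','c','t',':'] s.toList = true
    · simp [findFromEndLoopA, findFromEndPhase, hs, hcons, hSub]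
    · by_cases hRe : PySem.Chars.isIn ['R','e',':'] s.toList = true
      · simp [findFromEndLoopA, findFromEndPhase, hs, hcons, hSub, hRe]
      · by_cases hDate : PySem.Chars.isIn ['D','a','t','e',':'] s.toList = true
        · simp [findFromEndLoopA, findFromEndPhase, hs, hcons, hSub, hRe, hDate]
        · have step : findFromEndLoopA text (n + 1) i sent tdx
              = findFromEndLoopA text n (i + 1)
                  (if sent = 0 ∧ PySem.Str.isIn "Sent:" s = true then i else sent)
                  (if tdx = 0 ∧ PySem.Str.isIn "To:" s = true then i else tdx) := by
            simp only [findFromEndLoopA, hs]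
            simp [hSub, hRe, hDate]
          rw [step, ih _ _ _ (by omega) (by omega)]
          have hi0 : i ≠ 0 := by omega
          by_cases hsent0 : sent = 0 <;> by_cases hto0 : tdx = 0 <;>
            by_cases hSent : PySem.Chars.isIn ['S','e','n','t',':'] s.toList = true <;>
            by_cases hTo : PySem.Chars.isIn ['T','o',':'] s.toList = true <;>
            simp only [findFromEndPhase, hcons, List.find?_cons, hs] <;>
            simp [hSub, hRe, hDate, hsent0, hto0, hSent, hTo, hi0]

lemma alt_eq_phase (line : String) (text : List String) (lineno : Int) :
    findFromEnd_alt line text lineno = findFromEndPhase text (lineno + 1) 0 0 := by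
  simp only [findFromEnd_alt, findFromEndPhase]
  cases h : (PySem.List.pyRange (lineno + 1) text.length 1).find? (fun j =>
      PySem.Str.isIn "Subject:" ((PySem.List.pyGet? text j).getD "")
        || PySem.Str.isIn "Re:" ((PySem.List.pyGet? text j).getD "")
        || PySem.Str.isIn "Date:" ((PySem.List.pyGet? text j).getD "")) <;>
    simp [h]

-- ===== VERDICT (by name: the statement is the Claim_ definition above) =====
theorem findFromEnd_spec : Claim_equal_findFromEnd := by
  intro line text lineno _hdom hpre
  unfold Spec_findFromEnd
  rw [alt_eq_phase line text lineno]
  unfold findFromEnd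
  exact loopA_eq_phase text _ (lineno + 1) 0 0 rfl (by unfold Pre_findFromEnd at hpre; omega)
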